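-- pv_equiv track=rewrite | github.com/iitp-ppi/DeepFoldPublic | deepfold/data/pdbx_parsing.py | _parse_oper_expr
-- ===== SOURCE A (Python) =====
-- from itertools import product
--
-- def _parse_oper_expr(expr: str):
--     # Remove whitespaces for easier parsing
--     expr = expr.replace(" ", "")
--
--     # Helper function to expand ranges like "1-4" into "1,2,3,4"
--     def expand_range(r):
--         start, end = map(int, r.split("-"))
--         return list(map(str, range(start, end + 1)))
--
--     # Helper function to compute cartesian product
--     def cartesian_product(groups):
--         # NOTE: Apply from right to left.
--         # if len(groups) == 1:
--         # return [groups[0][::-1]]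
--         return [list(r) for r in product(*groups[::-1])]
--
--     # Tokenize and parse the expression
--     tokens = expr.strip("()").split(")(")
--     parsed_tokens = []
--
--     for token in tokens:
--         if "-" in token:  # Range detected
--             ranges = token.split(",")
--             expanded_ranges = [expand_range(r) if "-" in r else [r] for r in ranges]
--             merged_ranges = [item for sublist in expanded_ranges for item in sublist]
--             parsed_tokens.append(merged_ranges)
--         else:  # Single numbers or lists
--             # parsed_tokens.append(list(map(int, token.split(","))))
--             parsed_tokens.append(token.split(","))
--
--     # Compute cartesian product if necessary
--     return cartesian_product(parsed_tokens)
-- ===== SOURCE B (Python) =====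
-- def _parse_oper_expr(expr: str):
--     # Same tokenization; combinations built by mixed-radix index decoding
--     # instead of itertools.product over the reversed group list.
--     expr = expr.replace(" ", "")
--     groups = []
--     for token in expr.strip("()").split(")("):
--         members = []
--         for piece in token.split(","):
--             if "-" in piece:
--                 lo, hi = map(int, piece.split("-"))
--                 members.extend(str(v) for v in range(lo, hi + 1))
--             else:
--                 members.append(piece)
--         groups.append(members)
--     total = 1
--     for g in groups:
--         total *= len(g)
--     out = []
--     for i in range(total):
--         combo = []
--         for g in groups:
--             combo.append(g[i % len(g)])
--             i //= len(g)
--         combo.reverse()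
--         out.append(combo)
--     return out
-- ===== Notes on version B (the rewrite author's own statement) =====
-- stated objective: alternative
-- what changed: The itertools.product over the reversed group list is replaced by mixed-radix decoding of a single index 0..N-1 (N = product of group sizes), and the per-token branch on '-' is replaced by a uniform per-piece expansion.
import Mathlib
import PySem

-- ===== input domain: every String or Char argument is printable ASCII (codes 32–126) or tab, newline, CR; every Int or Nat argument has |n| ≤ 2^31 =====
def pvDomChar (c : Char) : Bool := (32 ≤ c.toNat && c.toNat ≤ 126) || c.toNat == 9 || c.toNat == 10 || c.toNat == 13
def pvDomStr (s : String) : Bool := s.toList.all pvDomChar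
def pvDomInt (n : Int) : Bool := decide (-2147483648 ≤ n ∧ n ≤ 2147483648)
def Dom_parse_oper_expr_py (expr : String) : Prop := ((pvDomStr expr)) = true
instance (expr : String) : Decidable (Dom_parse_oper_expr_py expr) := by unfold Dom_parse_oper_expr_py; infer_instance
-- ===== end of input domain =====

-- B replaces A's itertools.product over the reversed group list by mixed-radix decoding of a
-- single index, and A's per-token '-' branch by a uniform per-piece expansion (objective: alternative).

-- ===== PORT A =====
-- tokens = expr.replace(" ", "").strip("()").split(")(")   (work on the code-point list side)
def pvTokensA (expr : String) : List (List Char) :=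
  PySem.Chars.splitOn
    (PySem.Chars.stripChars (PySem.Chars.replace expr.toList [' '] []) ['(', ')'])
    [')', '(']

-- expand_range(r): start, end = map(int, r.split("-")); [str(v) for v in range(start, end+1)]
-- none exactly where Python raises ValueError (not two pieces / int() fails)
def pvExpandRangeA? (r : List Char) : Option (List (List Char)) :=
  match PySem.Chars.splitOn r ['-'] with
  | [a, b] =>
    match PySem.Int.ofChars? a, PySem.Int.ofChars? b with
    | some s, some e => some ((PySem.List.pyRange s (e + 1) 1).map PySem.Int.toChars)
    | _, _ => none
  | _ => none

-- the body of A's `for token in tokens` loop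
def pvParseTokenA? (token : List Char) : Option (List (List Char)) :=
  if PySem.Chars.isIn ['-'] token then
    ((PySem.Chars.splitOn token [',']).mapM
        (fun r => if PySem.Chars.isIn ['-'] r then pvExpandRangeA? r else some [r])).map
      List.flatten
  else
    some (PySem.Chars.splitOn token [','])

-- itertools.product(*groups): nested loops, last factor varies fastest
def pvProductA (groups : List (List (List Char))) : List (List (List Char)) :=
  groups.foldl (fun acc g => acc.flatMap (fun c => g.map (fun x => c ++ [x]))) [[]]

def parse_oper_expr_py (expr : String) : List (List String) :=
  match (pvTokensA expr).mapM pvParseTokenA? with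
  | some groups => (pvProductA groups.reverse).map (fun c => c.map String.ofList)
  | none => []      -- unreachable under Pre_ (Python raises ValueError there)

-- ===== PORT B =====
def pvTokensB (expr : String) : List (List Char) :=
  PySem.Chars.splitOn
    (PySem.Chars.stripChars (PySem.Chars.replace expr.toList [' '] []) ['(', ')'])
    [')', '(']

-- B's per-piece expansion: every comma piece, range or not, yields its member list
def pvExpandPieceB? (piece : List Char) : Option (List (List Char)) :=
  if PySem.Chars.isIn ['-'] piece then
    match PySem.Chars.splitOn piece ['-'] with
    | [a, b] =>
      match PySem.Int.ofChars? a, PySem.Int.ofChars? b with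
      | some lo, some hi => some ((PySem.List.pyRange lo (hi + 1) 1).map PySem.Int.toChars)
      | _, _ => none
    | _ => none
  else some [piece]

def pvGroupB? (token : List Char) : Option (List (List Char)) :=
  ((PySem.Chars.splitOn token [',']).mapM pvExpandPieceB?).map List.flatten

-- one step of B's inner loop: combo.append(g[i % len(g)]); i //= len(g)
-- (g[i % len(g)] is ported as pyGetD with a dummy default: the index is in range whenever the
--  loop body runs, since total > 0 forces every group non-empty)
def pvDecodeStep (st : List (List Char) × Int) (g : List (List Char)) :
    List (List Char) × Int :=
  (st.1 ++ [PySem.List.pyGetD g (PySem.Int.mod st.2 (g.length : Int)) []],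
   PySem.Int.floordiv st.2 (g.length : Int))

def pvDecodeB (groups : List (List (List Char))) (i : Int) : List (List Char) :=
  (groups.foldl pvDecodeStep ([], i)).1.reverse

def parse_oper_expr_py_alt (expr : String) : List (List String) :=
  match (pvTokensB expr).mapM pvGroupB? with
  | some groups =>
    let total : Int := groups.foldl (fun acc g => acc * (g.length : Int)) 1
    (PySem.List.pyRange 0 total 1).foldl
      (fun out i => out ++ [(pvDecodeB groups i).map String.ofList]) []
  | none => []

-- ===== PRECONDITION & SPEC =====
-- a comma piece is fine unless it contains '-' and is not two int()-parseable parts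
def pvPieceOK (p : List Char) : Bool :=
  !(PySem.Chars.isIn ['-'] p) ||
    (match PySem.Chars.splitOn p ['-'] with
     | [a, b] => (PySem.Int.ofChars? a).isSome && (PySem.Int.ofChars? b).isSome
     | _ => false)

-- Pre_ excludes exactly the inputs where Python A raises ValueError: some comma piece of some
-- token contains '-' but is not two int()-parseable parts (B raises there too).
def Pre_parse_oper_expr_py (expr : String) : Prop :=
  ((pvTokensA expr).all (fun t => (PySem.Chars.splitOn t [',']).all pvPieceOK)) = true

instance (expr : String) : Decidable (Pre_parse_oper_expr_py expr) := by
  unfold Pre_parse_oper_expr_py; infer_instance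

def pvWitness_parse_oper_expr_py : String := "(1-3)(5,6)"

def Spec_parse_oper_expr_py (expr : String) (out : List (List String)) : Prop :=
  out = parse_oper_expr_py_alt expr
instance (expr : String) (out : List (List String)) : Decidable (Spec_parse_oper_expr_py expr out) := by
  unfold Spec_parse_oper_expr_py; infer_instance

-- ===== CLAIM (what is proved, stated in full; the proofs are below) =====
def Claim_equal_parse_oper_expr_py : Prop := ∀ (expr : String), Dom_parse_oper_expr_py expr → Pre_parse_oper_expr_py expr → Spec_parse_oper_expr_py expr (parse_oper_expr_py expr)

-- ===== LEMMAS AND PROOFS =====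

-- characters of a splitOn piece come from the split string (or its accumulators)
theorem pv_go_chars (sep : List Char) (fuel : Nat) : ∀ (l cur : List Char) (acc : List (List Char))
    (p : List Char), p ∈ PySem.Chars.splitOn.go sep fuel l cur acc →
    (∀ c ∈ p, c ∈ l ∨ c ∈ cur ∨ ∃ q ∈ acc, c ∈ q) := by
  induction fuel with
  | zero =>
    intro l cur acc p hp c hc
    simp [PySem.Chars.splitOn.go] at hp
    rcases hp with h | h
    · right; right; exact ⟨p, h, hc⟩
    · subst h; simp at hc; rcases hc with h | h
      · right; left; simpa using h
      · left; exact h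
  | succ fuel ih =>
    intro l cur acc p hp c hc
    match l with
    | [] =>
      simp [PySem.Chars.splitOn.go] at hp
      rcases hp with h | h
      · right; right; exact ⟨p, h, hc⟩
      · subst h; right; left; simpa using hc
    | ch :: rest =>
      rw [PySem.Chars.splitOn.go] at hp
      by_cases hpre : sep.isPrefixOf (ch :: rest) = true
      · simp only [hpre, if_true] at hp
        have := ih (List.drop sep.length (ch :: rest)) [] (cur.reverse :: acc) p hp c hc
        rcases this with h | h | ⟨q, hq, hcq⟩
        · left; exact List.mem_of_mem_drop h
        · simp at h
        · simp at hq; rcases hq with h | h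
          · subst h; right; left; simpa using hcq
          · right; right; exact ⟨q, h, hcq⟩
      · simp only [hpre] at hp
        have := ih rest (ch :: cur) acc p hp c hc
        rcases this with h | h | h
        · left; exact List.mem_cons_of_mem _ h
        · simp at h; rcases h with h | h
          · left; simp [h]
          · right; left; exact h
        · right; right; exact h

theorem pv_splitOn_chars (s sep p : List Char) (hp : p ∈ PySem.Chars.splitOn s sep) :
    ∀ c ∈ p, c ∈ s := by
  intro c hc
  have := pv_go_chars sep (s.length + 1) s [] [] p hp c hc
  simpa using this

theorem pv_mapM_some {α β : Type} (f : α → Option β) (g : α → β) (l : List α)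
    (h : ∀ x ∈ l, f x = some (g x)) : l.mapM f = some (l.map g) := by
  induction l with
  | nil => rfl
  | cons a t ih =>
    simp only [List.mapM_cons, h a (List.mem_cons_self), ih (fun x hx => h x (List.mem_cons_of_mem a hx))]
    rfl

-- A's loop body and B's loop body agree on every token
theorem pv_flatten_map_singleton {α : Type} (l : List α) : (l.map (fun p => [p])).flatten = l := by
  induction l with
  | nil => rfl
  | cons a t ih => simp [ih]

theorem pv_token_eq (t : List Char) : pvParseTokenA? t = pvGroupB? t := by
  unfold pvParseTokenA? pvGroupB?
  by_cases h : PySem.Chars.isIn ['-'] t = true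
  · rw [if_pos h]
    have hfe : (fun r => if PySem.Chars.isIn ['-'] r then pvExpandRangeA? r else some [r])
        = pvExpandPieceB? := by
      funext r; unfold pvExpandPieceB? pvExpandRangeA?; rfl
    rw [hfe]
  · rw [if_neg h]
    have h' : PySem.Chars.isIn ['-'] t = false := by simpa using h
    have hpieces : ∀ p ∈ PySem.Chars.splitOn t [','], pvExpandPieceB? p = some [p] := by
      intro p hp
      have hnp : PySem.Chars.isIn ['-'] p = false := by
        rw [PySem.Chars.isIn_eq_false_iff]
        intro hinf
        have hm : '-' ∈ p := (List.singleton_infix_iff '-' p).mp hinf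
        have : '-' ∈ t := pv_splitOn_chars t [','] p hp '-' hm
        rw [PySem.Chars.isIn_eq_false_iff] at h'
        exact h' ((List.singleton_infix_iff '-' t).mpr this)
      unfold pvExpandPieceB?
      rw [hnp]
      rfl
    rw [pv_mapM_some pvExpandPieceB? (fun p => [p]) _ hpieces]
    simp [pv_flatten_map_singleton]

-- B's total accumulator is the product of the group lengths
theorem pv_total_eq (groups : List (List (List Char))) (c : Int) :
    groups.foldl (fun acc g => acc * (g.length : Int)) c
      = c * (((groups.map List.length).prod : Nat) : Int) := by
  induction groups generalizing c with
  | nil => simp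
  | cons g t ih => simp only [List.foldl_cons, ih, List.map_cons, List.prod_cons]; push_cast; ring

-- B's inner fold accumulates on the left
theorem pv_decode_acc (t : List (List (List Char))) (c : List (List Char)) (i : Int) :
    t.foldl pvDecodeStep (c, i)
      = (c ++ (t.foldl pvDecodeStep ([], i)).1, (t.foldl pvDecodeStep ([], i)).2) := by
  induction t generalizing c i with
  | nil => simp
  | cons g r ih =>
    simp only [List.foldl_cons, pvDecodeStep]
    rw [ih (c ++ [_]), ih ([] ++ [_])]
    simp

theorem pv_decode_cons (g : List (List Char)) (t : List (List (List Char))) (i : Int) :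
    pvDecodeB (g :: t) i
      = pvDecodeB t (PySem.Int.floordiv i (g.length : Int))
          ++ [PySem.List.pyGetD g (PySem.Int.mod i (g.length : Int)) []] := by
  unfold pvDecodeB
  simp only [List.foldl_cons, pvDecodeStep]
  rw [pv_decode_acc]
  simp

theorem pv_map_getD_range {α : Type} (l : List α) (d : α) :
    (List.range l.length).map (fun k => l.getD k d) = l := by
  induction l with
  | nil => simp
  | cons a t ih =>
    rw [List.length_cons, List.range_succ_eq_map, List.map_cons, List.map_map]
    simp only [List.getD_cons_zero, Function.comp_def, List.getD_cons_succ]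
    rw [ih]

-- decoding T*a + k (0 ≤ k < a) in radix a gives digit k and carry T
theorem pv_radix (a T k : Int) (ha : 0 < a) (hk0 : 0 ≤ k) (hk : k < a) :
    PySem.Int.floordiv (T * a + k) a = T ∧ PySem.Int.mod (T * a + k) a = k := by
  rw [PySem.Int.floordiv_eq_ediv_of_pos ha, PySem.Int.mod_eq_emod_of_pos ha]
  constructor
  · rw [show T * a + k = k + a * T by ring, Int.add_mul_ediv_left _ _ (by omega),
      Int.ediv_eq_zero_of_lt hk0 hk]
    ring
  · rw [show T * a + k = k + a * T by ring, Int.add_mul_emod_self_left,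
      Int.emod_eq_of_lt hk0 hk]

-- one block of a mixed-radix index range decodes to one pass over the group
theorem pv_block (D : Int → List (List Char)) (g : List (List Char)) (T : Nat) :
    (PySem.List.pyRange 0 ((T : Int) * (g.length : Int)) 1).map
        (fun i => D (PySem.Int.floordiv i (g.length : Int))
            ++ [PySem.List.pyGetD g (PySem.Int.mod i (g.length : Int)) []])
      = (PySem.List.pyRange 0 (T : Int) 1).flatMap (fun j => g.map (fun x => D j ++ [x])) := by
  by_cases hg : g.length = 0
  · have hgnil : g = [] := List.length_eq_zero_iff.mp hg
    subst hgnil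
    rw [show ((T : Int) * (([] : List (List Char)).length : Int)) = 0 by simp]
    simp [PySem.List.pyRange_one_eq_nil (le_refl (0:Int))]
  · have ha : 0 < g.length := Nat.pos_of_ne_zero hg
    have hai : (0 : Int) < (g.length : Int) := by exact_mod_cast ha
    induction T with
    | zero => simp [PySem.List.pyRange_one_eq_nil]
    | succ T ih =>
      rw [show (((T + 1 : Nat)) : Int) * (g.length : Int)
            = (T : Int) * (g.length : Int) + (g.length : Int) by push_cast; ring,
        PySem.List.pyRange_one_append 0 ((T : Int) * (g.length : Int))
          ((T : Int) * (g.length : Int) + (g.length : Int)) (by positivity) (by omega),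
        List.map_append, ih,
        show (((T + 1 : Nat)) : Int) = (T : Int) + 1 by push_cast; ring,
        PySem.List.pyRange_one_succ_right (by positivity), List.flatMap_append]
      congr 1
      -- the fresh block [T*a, T*a + a) maps to one pass over g
      rw [PySem.List.pyRange_one]
      have hlen : ((T : Int) * (g.length : Int) + (g.length : Int)
          - (T : Int) * (g.length : Int)).toNat = g.length := by omega
      rw [hlen]
      have hcong : ∀ k ∈ List.range g.length,
          D (PySem.Int.floordiv ((T : Int) * (g.length : Int) + (k : Int)) (g.length : Int))
            ++ [PySem.List.pyGetD g
                  (PySem.Int.mod ((T : Int) * (g.length : Int) + (k : Int)) (g.length : Int)) []]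
          = D (T : Int) ++ [g.getD k []] := by
        intro k hk
        have hk' : (k : Int) < (g.length : Int) := by
          exact_mod_cast List.mem_range.mp hk
        obtain ⟨h1, h2⟩ := pv_radix (g.length : Int) (T : Int) (k : Int) hai (by positivity) hk'
        rw [h1, h2, PySem.List.pyGetD_natCast]
      rw [List.map_map]
      simp only [Function.comp_def]
      rw [List.map_congr_left hcong,
        show (fun k => D (T : Int) ++ [g.getD k []])
            = (fun x => D (T : Int) ++ [x]) ∘ (fun k => g.getD k []) from rfl,
        ← List.map_map, pv_map_getD_range]
      simp

-- the heart of the proof: product over the reversed groups IS mixed-radix decoding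
theorem pv_main (groups : List (List (List Char))) :
    pvProductA groups.reverse
      = (PySem.List.pyRange 0 (((groups.map List.length).prod : Nat) : Int) 1).map
          (pvDecodeB groups) := by
  induction groups with
  | nil =>
    show pvProductA [] = _
    rw [show ((([] : List (List (List Char))).map List.length).prod : Nat) = 1 from rfl]
    rw [show ((1 : Nat) : Int) = 0 + 1 from rfl, PySem.List.pyRange_one_singleton]
    rfl
  | cons g t ih =>
    rw [List.reverse_cons,
      show pvProductA (t.reverse ++ [g])
          = (pvProductA t.reverse).flatMap (fun c => g.map (fun x => c ++ [x])) from by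
        unfold pvProductA; rw [List.foldl_append]; rfl,
      ih, List.flatMap_map,
      show ((((g :: t).map List.length).prod : Nat) : Int)
          = (((t.map List.length).prod : Nat) : Int) * (g.length : Int) by
        rw [List.map_cons, List.prod_cons]; push_cast; ring,
      ← pv_block (pvDecodeB t) g ((t.map List.length).prod)]
    apply List.map_congr_left
    intro i _
    exact (pv_decode_cons g t i).symm

-- ===== VERDICT (by name: the statement is the Claim_ definition above) =====
theorem parse_oper_expr_py_spec : Claim_equal_parse_oper_expr_py := by
  intro expr _ _
  unfold Spec_parse_oper_expr_py parse_oper_expr_py parse_oper_expr_py_alt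
  have htok : pvTokensB = pvTokensA := rfl
  have hfun : pvGroupB? = pvParseTokenA? := funext fun t => (pv_token_eq t).symm
  rw [htok, hfun]
  cases hm : (pvTokensA expr).mapM pvParseTokenA? with
  | none => rfl
  | some groups =>
    simp only
    rw [PySem.List.foldl_append_singleton_eq_map, List.nil_append,
      pv_total_eq groups 1, one_mul, pv_main, List.map_map]
    rfl
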